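-- pv_equiv track=rewrite | github.com/antonkkk/HW_Repo | HW_10.py | string_with_symbols
-- ===== SOURCE A (Python) =====
-- def string_with_symbols(text):
--     lst = []
--     for i in text:
--         if i != "#":
--             lst.append(i)
--         elif len(lst) > 0:
--             lst.pop()
--
--     return lst
-- ===== SOURCE B (Python) =====
-- def string_with_symbols(text):
--     items = list(text)
--     out = []
--     skip = 0
--     for c in reversed(items):
--         if c == "#":
--             skip += 1
--         elif skip > 0:
--             skip -= 1
--         else:
--             out.append(c)
--     out.reverse()
--     return out
-- ===== Notes on version B (the rewrite author's own statement) =====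
-- stated objective: alternative
-- what changed: Replaces A's left-to-right stack simulation (append/pop) by a single right-to-left scan with an integer skip counter, appending only surviving characters and reversing once at the end.
import Mathlib
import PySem

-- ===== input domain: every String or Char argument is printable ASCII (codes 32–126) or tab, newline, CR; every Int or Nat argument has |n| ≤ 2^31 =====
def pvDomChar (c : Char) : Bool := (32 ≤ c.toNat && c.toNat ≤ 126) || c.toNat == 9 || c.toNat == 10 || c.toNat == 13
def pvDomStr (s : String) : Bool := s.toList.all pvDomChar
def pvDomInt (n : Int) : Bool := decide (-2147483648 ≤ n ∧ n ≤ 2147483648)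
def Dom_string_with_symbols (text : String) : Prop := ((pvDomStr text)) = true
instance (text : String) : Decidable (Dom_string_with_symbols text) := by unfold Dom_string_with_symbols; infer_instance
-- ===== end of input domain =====

-- B replaces A's left-to-right stack (append/pop) by a right-to-left scan with a skip counter; alternative algorithm, same cost.

-- ===== PORT A =====
-- loop body of A: append i unless it is '#', in which case pop if nonempty
def pvStepA (lst : List String) (i : Char) : List String :=
  if i ≠ '#' then lst ++ [Char.toString i]
  else if lst.length > 0 then lst.dropLast else lst

def string_with_symbols (text : String) : List String :=
  text.toList.foldl pvStepA []

-- ===== PORT B =====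
-- loop body of B: state (skip, out); '#' increments skip, a skipped char decrements it, otherwise append
def pvStepB (st : Nat × List String) (c : Char) : Nat × List String :=
  if c = '#' then (st.1 + 1, st.2)
  else if st.1 > 0 then (st.1 - 1, st.2)
  else (st.1, st.2 ++ [Char.toString c])

def string_with_symbols_alt (text : String) : List String :=
  let items := text.toList
  (items.reverse.foldl pvStepB (0, [])).2.reverse

-- ===== PRECONDITION & SPEC =====
def Spec_string_with_symbols (text : String) (out : List String) : Prop := out = string_with_symbols_alt text
instance (text : String) (out : List String) : Decidable (Spec_string_with_symbols text out) := by unfold Spec_string_with_symbols; infer_instance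

-- ===== CLAIM (what is proved, stated in full; the proofs are below) =====
def Claim_equal_string_with_symbols : Prop := ∀ (text : String), Dom_string_with_symbols text → Spec_string_with_symbols text (string_with_symbols text)

-- ===== LEMMAS AND PROOFS =====

-- pvStepB on an explicit pair, for rewriting the head step without unfolding the fold body
theorem pvStepB_eq (k : Nat) (out : List String) (c : Char) :
    pvStepB (k, out) c
      = if c = '#' then (k + 1, out) else if k > 0 then (k - 1, out) else (k, out ++ [Char.toString c]) := rfl

-- the skip count of B's fold never depends on the output accumulator, and the output grows by suffix
theorem pvFoldB_acc (ys : List Char) : ∀ (k : Nat) (acc : List String),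
    (ys.foldl pvStepB (k, acc)).2 = acc ++ (ys.foldl pvStepB (k, [])).2 := by
  induction ys with
  | nil => intro k acc; simp
  | cons c ys ih =>
    intro k acc
    show (List.foldl pvStepB (pvStepB (k, acc) c) ys).2
        = acc ++ (List.foldl pvStepB (pvStepB (k, []) c) ys).2
    rw [pvStepB_eq, pvStepB_eq]
    by_cases hc : c = '#'
    · rw [if_pos hc, if_pos hc]
      exact ih (k + 1) acc
    · rw [if_neg hc, if_neg hc]
      by_cases hk : k > 0
      · rw [if_pos hk, if_pos hk]
        exact ih (k - 1) acc
      · rw [if_neg hk, if_neg hk]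
        rw [ih k (acc ++ [Char.toString c]), ih k ([] ++ [Char.toString c])]
        simp

-- a '#' step of A is exactly dropLast
theorem pvStepA_hash (lst : List String) : pvStepA lst '#' = lst.dropLast := by
  unfold pvStepA
  by_cases h : lst.length > 0
  · simp [h]
  · simp at h
    simp [h]

-- a non-'#' step of A is exactly append
theorem pvStepA_app (lst : List String) (c : Char) (hc : ¬ c = '#') :
    pvStepA lst c = lst ++ [Char.toString c] := by
  unfold pvStepA
  rw [if_pos hc]

-- main invariant: B's fold on ys with skip k computes the reverse of A's result on ys.reverse followed by k pops
theorem pvMain (ys : List Char) : ∀ (k : Nat),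
    (ys.foldl pvStepB (k, [])).2 = (List.dropLast^[k] (ys.reverse.foldl pvStepA [])).reverse := by
  induction ys with
  | nil =>
    intro k
    induction k with
    | zero => simp
    | succ k ih => simp_all [Function.iterate_succ_apply]
  | cons c ys ih =>
    intro k
    have hsnoc : (c :: ys).reverse.foldl pvStepA ([] : List String)
        = pvStepA (ys.reverse.foldl pvStepA []) c := by
      simp [List.foldl_append]
    show (List.foldl pvStepB (pvStepB (k, []) c) ys).2 = _
    rw [pvStepB_eq]
    by_cases hc : c = '#'
    · rw [if_pos hc]
      subst hc
      rw [ih (k + 1), hsnoc, pvStepA_hash, Function.iterate_succ_apply]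
    · rw [if_neg hc]
      by_cases hk : k > 0
      · rw [if_pos hk]
        rw [ih (k - 1), hsnoc, pvStepA_app _ _ hc]
        obtain ⟨k', rfl⟩ : ∃ k', k = k' + 1 := ⟨k - 1, by omega⟩
        simp [Function.iterate_succ_apply]
      · rw [if_neg hk]
        have hk0 : k = 0 := by omega
        subst hk0
        rw [pvFoldB_acc, ih 0, hsnoc, pvStepA_app _ _ hc]
        simp

theorem string_with_symbols_eq (text : String) :
    string_with_symbols_alt text = string_with_symbols text := by
  show (List.foldl pvStepB (0, []) text.toList.reverse).2.reverse = string_with_symbols text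
  unfold string_with_symbols
  rw [pvMain text.toList.reverse 0]
  simp

-- ===== VERDICT (by name: the statement is the Claim_ definition above) =====
theorem string_with_symbols_spec : Claim_equal_string_with_symbols := by
  intro text _
  unfold Spec_string_with_symbols
  exact (string_with_symbols_eq text).symm
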